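-- pv_equiv track=rewrite | github.com/adrimrtnz/Apuntes_Inf_UPV | 4º/ALT/Lab/P02/variacionesrep.py | variacionesRepeticion
-- ===== SOURCE A (Python) =====
-- def variacionesRepeticion(elementos, cantidad):
--
--     def backtracking(sol):
--         if len(sol) == cantidad:
--             yield sol.copy()
--         else:
--             for opcion in elementos:
--                 sol.append(opcion)
--                 yield from backtracking(sol)
--                 sol.pop()
--
--     yield from backtracking([])
-- ===== SOURCE B (Python) =====
-- def variacionesRepeticion(elementos, cantidad):
--     result = [[]]
--     for _ in range(cantidad):
--         result = [r + [e] for r in result for e in elementos]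
--     yield from result
-- ===== Notes on version B (the rewrite author's own statement) =====
-- stated objective: alternative
-- what changed: Replaces the recursive backtracking generator with a shared mutable list by an iterative layer-by-layer construction (result = [[]] extended cantidad times by every element), yielding the same sequences in the same lexicographic order.
-- outside the precondition, e.g. on variacionesRepeticion([], -1): A returns [], B returns [[]]
import Mathlib
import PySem

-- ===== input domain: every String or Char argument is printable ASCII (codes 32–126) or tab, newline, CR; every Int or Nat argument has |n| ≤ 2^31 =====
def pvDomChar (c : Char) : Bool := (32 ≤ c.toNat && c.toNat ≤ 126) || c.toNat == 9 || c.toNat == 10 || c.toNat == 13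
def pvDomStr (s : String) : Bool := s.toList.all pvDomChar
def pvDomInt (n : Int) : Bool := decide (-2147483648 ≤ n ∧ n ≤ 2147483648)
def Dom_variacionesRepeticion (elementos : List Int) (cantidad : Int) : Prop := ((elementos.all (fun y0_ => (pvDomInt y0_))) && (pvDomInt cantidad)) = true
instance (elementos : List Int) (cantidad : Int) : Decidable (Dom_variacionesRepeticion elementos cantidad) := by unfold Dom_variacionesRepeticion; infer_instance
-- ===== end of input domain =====

-- B replaces A's recursive backtracking generator by an iterative layer-by-layer construction (alternative decomposition, same cost).

-- ===== PORT A =====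
-- A's inner generator `backtracking(sol)`: the fuel argument is `cantidad - len(sol)`
-- (always ≥ 0 under Pre_), making the recursion structural; the `if len(sol) == cantidad`
-- test is kept verbatim.
def pvBackA (elementos : List Int) (cantidad : Int) (sol : List Int) : Nat → List (List Int)
  | 0 => if (sol.length : Int) = cantidad then [sol] else []
  | f + 1 =>
      if (sol.length : Int) = cantidad then [sol]
      else elementos.flatMap (fun opcion => pvBackA elementos cantidad (sol ++ [opcion]) f)

def variacionesRepeticion (elementos : List Int) (cantidad : Int) : List (List Int) :=
  pvBackA elementos cantidad [] cantidad.toNat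

-- ===== PORT B =====
def variacionesRepeticion_alt (elementos : List Int) (cantidad : Int) : List (List Int) :=
  (List.range cantidad.toNat).foldl
    (fun result _ => result.flatMap (fun r => elementos.map (fun e => r ++ [e])))
    [[]]

-- ===== PRECONDITION & SPEC =====
-- Pre_ excludes negative cantidad: with nonempty elementos A recurses without bound (RecursionError, len(sol) == cantidad never holds), and with empty elementos a negative count is an unspecified corner where A happens to return [] and B [[]], both defensible.
def Pre_variacionesRepeticion (elementos : List Int) (cantidad : Int) : Prop := 0 ≤ cantidad
instance (elementos : List Int) (cantidad : Int) : Decidable (Pre_variacionesRepeticion elementos cantidad) := by unfold Pre_variacionesRepeticion; infer_instance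
def pvWitness_variacionesRepeticion : List Int × Int := ([1, 2], 2)

def Spec_variacionesRepeticion (elementos : List Int) (cantidad : Int) (out : List (List Int)) : Prop := out = variacionesRepeticion_alt elementos cantidad
instance (elementos : List Int) (cantidad : Int) (out : List (List Int)) : Decidable (Spec_variacionesRepeticion elementos cantidad out) := by unfold Spec_variacionesRepeticion; infer_instance

-- ===== CLAIM (what is proved, stated in full; the proofs are below) =====
def Claim_equal_variacionesRepeticion : Prop := ∀ (elementos : List Int) (cantidad : Int), Dom_variacionesRepeticion elementos cantidad → Pre_variacionesRepeticion elementos cantidad → Spec_variacionesRepeticion elementos cantidad (variacionesRepeticion elementos cantidad)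

-- ===== LEMMAS AND PROOFS =====

-- front-extension layers: all length-n sequences over e, first element outermost
def pvLayer (e : List Int) : Nat → List (List Int)
  | 0 => [[]]
  | n + 1 => e.flatMap (fun x => (pvLayer e n).map (fun l => x :: l))

-- A's DFS from `sol` with exact fuel n produces sol ++ each length-n tail.
theorem pvBackA_eq_layer (e : List Int) (c : Int) (sol : List Int) (n : Nat)
    (h : (sol.length : Int) + n = c) :
    pvBackA e c sol n = (pvLayer e n).map (fun l => sol ++ l) := by
  induction n generalizing sol with
  | zero =>
      simp at h
      simp [pvBackA, pvLayer, h]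
  | succ n ih =>
      have hne : ¬ ((sol.length : Int) = c) := by omega
      simp only [pvBackA, pvLayer, if_neg hne]
      rw [List.map_flatMap]
      refine List.flatMap_congr ?_
      intro x _
      rw [ih (sol ++ [x]) (by simp; omega), List.map_map]
      simp [Function.comp]

-- front extension = back extension, layer by layer
theorem pvLayer_succ_back (e : List Int) (n : Nat) :
    pvLayer e (n + 1) = (pvLayer e n).flatMap (fun r => e.map (fun x => r ++ [x])) := by
  induction n with
  | zero => simp [pvLayer, ← List.map_eq_flatMap]
  | succ n ih =>
      show e.flatMap (fun x => (pvLayer e (n + 1)).map (fun l => x :: l))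
          = (pvLayer e (n + 1)).flatMap (fun r => e.map (fun x => r ++ [x]))
      conv_lhs => rw [ih]
      conv_rhs => rw [show pvLayer e (n + 1)
        = e.flatMap (fun x => (pvLayer e n).map (fun l => x :: l)) from rfl]
      simp only [List.map_flatMap, List.flatMap_map, List.map_map, Function.comp_def,
        List.flatMap_assoc, List.cons_append]

-- B's fold over range n computes pvLayer e n
theorem pvFold_eq_layer (e : List Int) (n : Nat) :
    (List.range n).foldl
      (fun result _ => result.flatMap (fun r => e.map (fun x => r ++ [x]))) [[]]
      = pvLayer e n := by
  induction n with
  | zero => simp [pvLayer]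
  | succ n ih => rw [List.range_succ, List.foldl_append, ih, List.foldl_cons, List.foldl_nil,
      pvLayer_succ_back]

-- ===== VERDICT (by name: the statement is the Claim_ definition above) =====
theorem variacionesRepeticion_spec : Claim_equal_variacionesRepeticion := by
  intro e c _ hpre
  have h0 : 0 ≤ c := hpre
  unfold Spec_variacionesRepeticion variacionesRepeticion variacionesRepeticion_alt
  rw [pvBackA_eq_layer e c [] c.toNat (by simp; omega), pvFold_eq_layer]
  simp
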